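-- pv_equiv track=rewrite | github.com/MoOsmanBTH/python | DV1574/2.21.py | matrix_dimensions
-- ===== SOURCE A (Python) =====
-- def matrix_dimensions(matrix):
--
--     first_row = len(matrix[0])
--     ret_msg = "This is a %dx%d matrix." % (len(matrix), first_row)
--
--     for a in range(1, len(matrix), 1):
--         if first_row != len(matrix[a]):
--             ret_msg = "This is not a valid matrix"
--             a = len(matrix)
--
--     return ret_msg
-- ===== SOURCE B (Python) =====
-- def matrix_dimensions(matrix):
--     first_row = len(matrix[0])
--     lengths = {len(r) for r in matrix}
--     if len(lengths) == 1:
--         return "This is a %dx%d matrix." % (len(matrix), first_row)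
--     return "This is not a valid matrix"
-- ===== Notes on version B (the rewrite author's own statement) =====
-- stated objective: simpler
-- what changed: Replaces the index loop comparing every row length against the first (with its dead 'a = len(matrix)' pseudo-break) by building the set of distinct row lengths once and branching on its cardinality.
import Mathlib
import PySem

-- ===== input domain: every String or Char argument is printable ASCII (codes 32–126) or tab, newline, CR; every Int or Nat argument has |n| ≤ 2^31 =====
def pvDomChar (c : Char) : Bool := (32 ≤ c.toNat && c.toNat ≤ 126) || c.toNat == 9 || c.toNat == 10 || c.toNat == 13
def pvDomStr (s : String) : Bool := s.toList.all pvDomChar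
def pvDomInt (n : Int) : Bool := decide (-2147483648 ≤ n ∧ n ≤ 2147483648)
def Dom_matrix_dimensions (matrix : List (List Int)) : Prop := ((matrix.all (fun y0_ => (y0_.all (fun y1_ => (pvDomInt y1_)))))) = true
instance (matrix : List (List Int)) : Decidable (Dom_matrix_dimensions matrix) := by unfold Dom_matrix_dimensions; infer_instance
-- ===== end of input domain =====

-- B builds the set of distinct row lengths once and branches on its cardinality,
-- instead of A's index loop comparing every row length against the first.

-- ===== PORT A =====
def matrix_dimensions (matrix : List (List Int)) : String :=
  match matrix with
  | [] => ""  -- len(matrix[0]) raises IndexError here; excluded by Pre_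
  | r0 :: _ =>
    let first_row : Int := r0.length
    let ret_msg := "This is a " ++ PySem.Int.toStr matrix.length ++ "x" ++ PySem.Int.toStr first_row ++ " matrix."
    (PySem.List.pyRange 1 matrix.length 1).foldl
      (fun msg a =>
        if first_row ≠ ((PySem.List.pyGetD matrix a []).length : Int)
        then "This is not a valid matrix" else msg)
      ret_msg

-- ===== PORT B =====
def matrix_dimensions_alt (matrix : List (List Int)) : String :=
  match matrix with
  | [] => ""  -- len(matrix[0]) raises IndexError here; excluded by Pre_
  | r0 :: _ =>
    let first_row : Int := r0.length
    let lengths : PySem.Set Int := PySem.Set.ofList (matrix.map (fun r => (r.length : Int)))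
    if PySem.Set.len lengths = 1 then
      "This is a " ++ PySem.Int.toStr matrix.length ++ "x" ++ PySem.Int.toStr first_row ++ " matrix."
    else "This is not a valid matrix"

-- ===== PRECONDITION & SPEC =====
-- Pre_ excludes only the empty matrix, on which both Pythons raise IndexError at matrix[0].
def Pre_matrix_dimensions (matrix : List (List Int)) : Prop := matrix ≠ []
instance (matrix : List (List Int)) : Decidable (Pre_matrix_dimensions matrix) := by unfold Pre_matrix_dimensions; infer_instance
def pvWitness_matrix_dimensions : List (List Int) := [[1, 2], [3, 4]]

def Spec_matrix_dimensions (matrix : List (List Int)) (out : String) : Prop := out = matrix_dimensions_alt matrix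
instance (matrix : List (List Int)) (out : String) : Decidable (Spec_matrix_dimensions matrix out) := by unfold Spec_matrix_dimensions; infer_instance

-- ===== CLAIM (what is proved, stated in full; the proofs are below) =====
def Claim_equal_matrix_dimensions : Prop := ∀ (matrix : List (List Int)), Dom_matrix_dimensions matrix → Pre_matrix_dimensions matrix → Spec_matrix_dimensions matrix (matrix_dimensions matrix)

-- ===== LEMMAS AND PROOFS =====

-- A's loop: once the message is set to the constant, it stays there.
theorem foldl_const_if {α : Type} (p : α → Prop) [DecidablePred p] (c : String) :
    ∀ (l : List α) (init : String),
      l.foldl (fun msg a => if p a then c else msg) init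
        = if ∃ a ∈ l, p a then c else init := by
  intro l
  induction l with
  | nil => intro init; simp
  | cons a t ih =>
    intro init
    simp only [List.foldl_cons]
    by_cases h : p a
    · simp [h, ih]
    · simp [h, ih]

-- a Nodup list whose elements are all x has length ≤ 1
theorem nodup_const_len {α : Type} [DecidableEq α] (x : α) :
    ∀ (l : List α), l.Nodup → (∀ y ∈ l, y = x) → l.length ≤ 1 := by
  intro l hnd hall
  match l with
  | [] => simp
  | [_] => simp
  | a :: b :: t =>
    exfalso
    have ha := hall a (by simp)
    have hb := hall b (by simp)
    have hab : a = b := ha.trans hb.symm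
    have := (List.nodup_cons.mp hnd).1
    exact this (by rw [hab]; simp)

-- cardinality-1 characterisation of the set of an inhabited list
theorem ofList_cons_len_one {α : Type} [DecidableEq α] (x : α) (xs : List α) :
    (PySem.Set.ofList (x :: xs)).length = 1 ↔ ∀ y ∈ xs, y = x := by
  constructor
  · intro h y hy
    obtain ⟨z, hz⟩ := List.length_eq_one_iff.mp h
    have hx : x ∈ PySem.Set.ofList (x :: xs) := by
      rw [PySem.Set.mem_ofList]; simp
    have hy' : y ∈ PySem.Set.ofList (x :: xs) := by
      rw [PySem.Set.mem_ofList]; simp [hy]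
    rw [hz] at hx hy'
    simp at hx hy'
    rw [hy', hx]
  · intro hall
    have hsub : ∀ y ∈ PySem.Set.ofList (x :: xs), y = x := by
      intro y hmem
      have hy2 : y ∈ x :: xs := (PySem.Set.mem_ofList _ _).mp hmem
      rcases List.mem_cons.mp hy2 with h' | h'
      · exact h'
      · exact hall y h' 
    have hle := nodup_const_len x _ (PySem.Set.nodup_ofList (x :: xs)) hsub
    have hge : 1 ≤ (PySem.Set.ofList (x :: xs)).length := by
      have hx : x ∈ PySem.Set.ofList (x :: xs) := by
        rw [PySem.Set.mem_ofList]; simp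
      exact List.length_pos_of_mem hx
    omega

-- ===== VERDICT (by name: the statement is the Claim_ definition above) =====
theorem matrix_dimensions_spec : Claim_equal_matrix_dimensions := by
  intro matrix _ hpre
  unfold Spec_matrix_dimensions matrix_dimensions matrix_dimensions_alt
  match matrix with
  | [] => exact absurd rfl hpre
  | r0 :: rest =>
    simp only []
    -- A's foldl over pyRange 1 n with pyGetD is a foldl over the dropped list
    rw [PySem.List.foldl_pyRange_pyGetD' (r0 :: rest) ([] : List Int)
          (fun msg row => if (r0.length : Int) ≠ (row.length : Int) then "This is not a valid matrix" else msg)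
          _ (by norm_num : (0:Int) ≤ 1)]
    simp only [Int.toNat_one, List.drop_succ_cons, List.drop_zero]
    rw [foldl_const_if (fun row : List Int => (r0.length : Int) ≠ (row.length : Int))]
    have hchar := ofList_cons_len_one (α := Int) (r0.length : Int) (rest.map (fun r => (r.length : Int)))
    by_cases hall : ∀ y ∈ rest.map (fun r => (r.length : Int)), y = (r0.length : Int)
    · have hex : ¬ ∃ row ∈ rest, (r0.length : Int) ≠ (row.length : Int) := by
        push Not
        intro row hr
        exact (hall _ (List.mem_map_of_mem hr)).symm
      have hcond : PySem.Set.len (PySem.Set.ofList ((r0 :: rest).map (fun r => (r.length : Int)))) = (1 : Int) := by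
        simp only [List.map_cons, PySem.Set.len]
        exact_mod_cast hchar.mpr hall
      rw [if_neg hex, if_pos hcond]
    · have hex : ∃ row ∈ rest, (r0.length : Int) ≠ (row.length : Int) := by
        push Not at hall
        obtain ⟨y, hy, hne⟩ := hall
        obtain ⟨row, hr, rfl⟩ := List.mem_map.mp hy
        exact ⟨row, hr, fun h => hne h.symm⟩
      have hcond : ¬ PySem.Set.len (PySem.Set.ofList ((r0 :: rest).map (fun r => (r.length : Int)))) = (1 : Int) := by
        simp only [List.map_cons, PySem.Set.len]
        intro h
        exact hall (hchar.mp (by exact_mod_cast h))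
      rw [if_pos hex, if_neg hcond]
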